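-- pv_equiv track=rewrite | github.com/COSC-499-W2025/capstone-project-team-1 | src/artifactminer/resume/extractors/enriched_constructs.py | _estimate_body_loc_python
-- ===== SOURCE A (Python) =====
-- from typing import List, Optional, Set
--
-- def _estimate_body_loc_python(lines: List[str], start_line: int, indent: int) -> int:
--     """Estimate LOC of a Python block starting at start_line with given indent."""
--     count = 0
--     for i in range(start_line, len(lines)):
--         stripped = lines[i].strip()
--         if not stripped:
--             continue
--         line_indent = len(lines[i]) - len(lines[i].lstrip())
--         if line_indent <= indent and stripped and i > start_line:
--             break
--         count += 1
--     return max(count, 1)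
-- ===== SOURCE B (Python) =====
-- from typing import List
--
-- def _estimate_body_loc_python(lines: List[str], start_line: int, indent: int) -> int:
--     """Estimate LOC of a Python block starting at start_line with given indent."""
--     n = len(lines)
--     end = n
--     for i in range(start_line + 1, n):
--         stripped = lines[i].strip()
--         if stripped and len(lines[i]) - len(lines[i].lstrip()) <= indent:
--             end = i
--             break
--     count = sum(1 for i in range(start_line, end) if lines[i].strip())
--     return max(count, 1)
-- ===== Notes on version B (the rewrite author's own statement) =====
-- stated objective: alternative
-- what changed: A fuses boundary detection and counting in one break-loop; B first computes the block's end index (first non-blank line after start_line with indent <= indent) and then counts non-blank lines in lines[start_line:end] in a separate pass.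
import Mathlib
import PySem

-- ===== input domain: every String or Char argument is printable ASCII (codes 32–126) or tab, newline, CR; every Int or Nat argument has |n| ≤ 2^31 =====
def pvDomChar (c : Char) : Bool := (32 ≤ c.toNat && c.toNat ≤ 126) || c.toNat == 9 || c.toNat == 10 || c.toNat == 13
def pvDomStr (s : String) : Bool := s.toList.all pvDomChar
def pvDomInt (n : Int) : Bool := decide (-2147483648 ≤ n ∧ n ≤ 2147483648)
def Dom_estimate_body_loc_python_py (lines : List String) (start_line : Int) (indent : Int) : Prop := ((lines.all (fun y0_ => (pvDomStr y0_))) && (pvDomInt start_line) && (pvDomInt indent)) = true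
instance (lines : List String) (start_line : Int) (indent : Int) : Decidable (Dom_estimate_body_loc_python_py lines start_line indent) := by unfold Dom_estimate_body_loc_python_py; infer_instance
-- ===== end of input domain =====

-- B replaces A's fused break-loop by two separate passes (find the block's end index, then
-- count non-blank lines in that slice); objective: alternative decomposition, same cost.

-- ===== PORT A =====
-- the for-loop with break/continue, recursing over the index list of range(start_line, len(lines))
def aLoop (lines : List String) (start_line : Int) (indent : Int) : List Int → Int → Int
  | [], count => count
  | i :: rest, count =>
    match PySem.List.pyGet? lines i with
    | none => count  -- IndexError in Python; excluded by Pre_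
    | some s =>
      let stripped := PySem.Str.strip s
      if stripped = "" then aLoop lines start_line indent rest count
      else
        let line_indent := PySem.Str.len s - PySem.Str.len (PySem.Str.lstrip s)
        if line_indent ≤ indent ∧ stripped ≠ "" ∧ i > start_line then count
        else aLoop lines start_line indent rest (count + 1)

def estimate_body_loc_python_py (lines : List String) (start_line : Int) (indent : Int) : Int :=
  max (aLoop lines start_line indent (PySem.List.pyRange start_line (lines.length : Int) 1) 0) 1

-- ===== PORT B =====
-- pass 1: end = first i in range(start_line+1, n) that is non-blank with indent <= indent, default n
def bFindEnd (lines : List String) (indent : Int) (n : Int) : List Int → Int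
  | [] => n
  | i :: rest =>
    match PySem.List.pyGet? lines i with
    | none => n  -- IndexError in Python; excluded by Pre_
    | some s =>
      if PySem.Str.strip s ≠ "" ∧ PySem.Str.len s - PySem.Str.len (PySem.Str.lstrip s) ≤ indent
      then i
      else bFindEnd lines indent n rest

-- pass 2: sum(1 for i in range(start_line, end) if lines[i].strip())
def bCount (lines : List String) : List Int → Int
  | [] => 0
  | i :: rest =>
    (match PySem.List.pyGet? lines i with
     | none => 0  -- IndexError in Python; excluded by Pre_
     | some s => if PySem.Str.strip s ≠ "" then 1 else 0) + bCount lines rest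

def estimate_body_loc_python_py_alt (lines : List String) (start_line : Int) (indent : Int) : Int :=
  max (bCount lines (PySem.List.pyRange start_line
        (bFindEnd lines indent (lines.length : Int)
          (PySem.List.pyRange (start_line + 1) (lines.length : Int) 1)) 1)) 1

-- ===== PRECONDITION & SPEC =====
-- A raises IndexError exactly when start_line < -len(lines) (negative index out of range); excluded.
def Pre_estimate_body_loc_python_py (lines : List String) (start_line : Int) (indent : Int) : Prop :=
  -(lines.length : Int) ≤ start_line
instance (lines : List String) (start_line : Int) (indent : Int) : Decidable (Pre_estimate_body_loc_python_py lines start_line indent) := by unfold Pre_estimate_body_loc_python_py; infer_instance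

def pvWitness_estimate_body_loc_python_py : List String × Int × Int :=
  (["def f():", "    x = 1", "", "    y = 2", "z = 3"], 1, 0)

def Spec_estimate_body_loc_python_py (lines : List String) (start_line : Int) (indent : Int) (out : Int) : Prop := out = estimate_body_loc_python_py_alt lines start_line indent
instance (lines : List String) (start_line : Int) (indent : Int) (out : Int) : Decidable (Spec_estimate_body_loc_python_py lines start_line indent out) := by unfold Spec_estimate_body_loc_python_py; infer_instance

-- ===== CLAIM (what is proved, stated in full; the proofs are below) =====
def Claim_equal_estimate_body_loc_python_py : Prop := ∀ (lines : List String) (start_line : Int) (indent : Int), Dom_estimate_body_loc_python_py lines start_line indent → Pre_estimate_body_loc_python_py lines start_line indent → Spec_estimate_body_loc_python_py lines start_line indent (estimate_body_loc_python_py lines start_line indent)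

-- ===== LEMMAS AND PROOFS =====

-- the end index found by pass 1 is at least the start of the scanned range
lemma bFindEnd_ge (lines : List String) (ind : Int) :
    ∀ (k : Nat) (a : Int), a ≤ (lines.length : Int) → ((lines.length : Int) - a).toNat ≤ k →
      a ≤ bFindEnd lines ind (lines.length : Int) (PySem.List.pyRange a (lines.length : Int) 1) := by
  intro k
  induction k with
  | zero =>
    intro a han hk
    rw [PySem.List.pyRange_one_eq_nil (by omega)]
    simp [bFindEnd]; omega
  | succ k ih =>
    intro a han hk
    by_cases hlt : a < (lines.length : Int)
    · rw [PySem.List.pyRange_one_cons hlt]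
      unfold bFindEnd
      cases hget : PySem.List.pyGet? lines a with
      | none => dsimp only; omega
      | some s =>
        dsimp only
        split_ifs with hc
        · omega
        · have := ih (a + 1) (by omega) (by omega)
          omega
    · rw [PySem.List.pyRange_one_eq_nil (by omega)]
      simp [bFindEnd]; omega

-- fused loop = count of non-blank lines up to the end found by pass 1, for indices strictly above start_line
lemma aLoop_eq (lines : List String) (sl ind : Int) (hsl : -(lines.length : Int) ≤ sl) :
    ∀ (k : Nat) (a c : Int), sl < a → ((lines.length : Int) - a).toNat ≤ k →
      aLoop lines sl ind (PySem.List.pyRange a (lines.length : Int) 1) c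
        = c + bCount lines (PySem.List.pyRange a
            (bFindEnd lines ind (lines.length : Int) (PySem.List.pyRange a (lines.length : Int) 1)) 1) := by
  intro k
  induction k with
  | zero =>
    intro a c ha hk
    rw [PySem.List.pyRange_one_eq_nil (by omega)]
    simp [aLoop, bFindEnd, bCount, PySem.List.pyRange_one_eq_nil (show (lines.length : Int) ≤ a by omega)]
  | succ k ih =>
    intro a c ha hk
    by_cases hlt : a < (lines.length : Int)
    · have hsome : (PySem.List.pyGet? lines a).isSome := by
        rw [Option.isSome_iff_ne_none]
        intro hn
        rw [PySem.List.pyGet?_eq_none_iff] at hn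
        exact hn ⟨by omega, hlt⟩
      obtain ⟨s, hs⟩ := Option.isSome_iff_exists.mp hsome
      rw [PySem.List.pyRange_one_cons hlt]
      unfold aLoop bFindEnd
      simp only [hs]
      by_cases hb : PySem.Str.strip s = ""
      · -- blank line: both passes skip it
        rw [if_pos hb]
        have hcond : ¬ (PySem.Str.strip s ≠ "" ∧
            PySem.Str.len s - PySem.Str.len (PySem.Str.lstrip s) ≤ ind) := by
          intro h; exact h.1 hb
        rw [if_neg hcond]
        have hge := bFindEnd_ge lines ind k (a + 1) (by omega) (by omega)
        rw [ih (a + 1) c (by omega) (by omega)]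
        rw [PySem.List.pyRange_one_cons (show a < bFindEnd lines ind (lines.length : Int)
              (PySem.List.pyRange (a + 1) (lines.length : Int) 1) by omega)]
        simp [bCount, hs, hb]
      · rw [if_neg hb]
        by_cases hi : PySem.Str.len s - PySem.Str.len (PySem.Str.lstrip s) ≤ ind
        · -- boundary line: break / end = a
          rw [if_pos ⟨hi, hb, ha⟩, if_pos ⟨hb, hi⟩]
          rw [PySem.List.pyRange_one_eq_nil (le_refl a)]
          simp [bCount]
        · -- counted body line
          rw [if_neg (by rintro ⟨h1, _, _⟩; exact hi h1),
              if_neg (by rintro ⟨_, h2⟩; exact hi h2)]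
          have hge := bFindEnd_ge lines ind k (a + 1) (by omega) (by omega)
          rw [ih (a + 1) (c + 1) (by omega) (by omega)]
          rw [PySem.List.pyRange_one_cons (show a < bFindEnd lines ind (lines.length : Int)
                (PySem.List.pyRange (a + 1) (lines.length : Int) 1) by omega)]
          simp [bCount, hs, hb]
          omega
    · rw [PySem.List.pyRange_one_eq_nil (by omega)]
      simp [aLoop, bFindEnd, bCount, PySem.List.pyRange_one_eq_nil (show (lines.length : Int) ≤ a by omega)]

-- ===== VERDICT (by name: the statement is the Claim_ definition above) =====
theorem estimate_body_loc_python_py_spec : Claim_equal_estimate_body_loc_python_py := by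
  intro lines sl ind _hdom hpre
  unfold Spec_estimate_body_loc_python_py estimate_body_loc_python_py estimate_body_loc_python_py_alt
  have hpre' : -(lines.length : Int) ≤ sl := hpre
  by_cases hlt : sl < (lines.length : Int)
  · have hsome : (PySem.List.pyGet? lines sl).isSome := by
      rw [Option.isSome_iff_ne_none]
      intro hn
      rw [PySem.List.pyGet?_eq_none_iff] at hn
      exact hn ⟨by omega, hlt⟩
    obtain ⟨s, hs⟩ := Option.isSome_iff_exists.mp hsome
    have hge := bFindEnd_ge lines ind (((lines.length : Int) - (sl + 1)).toNat) (sl + 1)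
      (by omega) (le_refl _)
    rw [PySem.List.pyRange_one_cons hlt]
    unfold aLoop
    simp only [hs]
    rw [PySem.List.pyRange_one_cons (show sl < bFindEnd lines ind (lines.length : Int)
          (PySem.List.pyRange (sl + 1) (lines.length : Int) 1) by omega)]
    by_cases hb : PySem.Str.strip s = ""
    · rw [if_pos hb]
      rw [aLoop_eq lines sl ind hpre' (((lines.length : Int) - (sl + 1)).toNat) (sl + 1) 0
            (by omega) (le_refl _)]
      simp [bCount, hs, hb]
    · rw [if_neg hb, if_neg (by rintro ⟨_, _, h3⟩; omega)]
      rw [aLoop_eq lines sl ind hpre' (((lines.length : Int) - (sl + 1)).toNat) (sl + 1) (0 + 1)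
            (by omega) (le_refl _)]
      simp [bCount, hs, hb]
  · rw [PySem.List.pyRange_one_eq_nil (show (lines.length : Int) ≤ sl by omega),
        PySem.List.pyRange_one_eq_nil (show (lines.length : Int) ≤ sl + 1 by omega)]
    simp [aLoop, bFindEnd, bCount, PySem.List.pyRange_one_eq_nil (show (lines.length : Int) ≤ sl by omega)]
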